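-- pv_equiv track=rewrite | github.com/balasrinivasanammu/Mallareddy-IT | bytexl_card_assesment.py | cards
-- ===== SOURCE A (Python) =====
-- def cards(n, k, powers):
--     deck = []
--
--     for power in powers:
--         while deck and deck[-1] < power:
--             deck.pop()
--         deck.append(power)
--
--
--     result = len(deck)
--
--     return result
-- ===== SOURCE B (Python) =====
-- def cards(n, k, powers):
--     count = 0
--     running = None
--     for p in reversed(powers):
--         if running is None or p >= running:
--             count += 1
--         if running is None:
--             running = p
--         else:
--             running = max(running, p)
--     return count
-- ===== Notes on version B (the rewrite author's own statement) =====
-- stated objective: simpler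
-- what changed: Replaced the explicit monotonic stack with a single right-to-left pass that counts suffix maxima (elements >= the running maximum of everything to their right).
import Mathlib
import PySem

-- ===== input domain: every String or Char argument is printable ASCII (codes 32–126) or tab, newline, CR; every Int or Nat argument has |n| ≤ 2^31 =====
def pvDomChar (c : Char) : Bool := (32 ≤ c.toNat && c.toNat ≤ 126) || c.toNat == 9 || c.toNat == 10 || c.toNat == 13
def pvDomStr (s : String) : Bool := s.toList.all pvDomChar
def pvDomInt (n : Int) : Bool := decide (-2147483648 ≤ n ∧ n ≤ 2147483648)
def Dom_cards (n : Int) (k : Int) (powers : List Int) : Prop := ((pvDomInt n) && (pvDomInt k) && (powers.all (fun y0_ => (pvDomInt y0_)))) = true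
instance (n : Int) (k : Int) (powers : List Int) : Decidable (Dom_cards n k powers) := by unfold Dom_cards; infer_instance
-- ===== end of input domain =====

-- B replaces A's explicit monotonic stack by a single right-to-left running-maximum count (simpler, O(1) space).

-- ===== PORT A =====
-- while deck and deck[-1] < power: deck.pop()
def popLoop (deck : List Int) (p : Int) : List Int :=
  match h : deck.getLast? with
  | some t => if t < p then popLoop deck.dropLast p else deck
  | none => deck
termination_by deck.length
decreasing_by
  cases deck with
  | nil => simp at h
  | cons a l => simp [List.length_dropLast]

def cards (n : Int) (k : Int) (powers : List Int) : Int :=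
  let deck := powers.foldl (fun deck power => popLoop deck power ++ [power]) ([] : List Int)
  (deck.length : Int)

-- ===== PORT B =====
-- one step of B's loop over reversed(powers): state = (count, running maximum so far)
def stepB (p : Int) (st : Int × Option Int) : Int × Option Int :=
  match st with
  | (c, none) => (c + 1, some p)
  | (c, some m) => (if m ≤ p then c + 1 else c, some (max m p))

def cards_alt (n : Int) (k : Int) (powers : List Int) : Int :=
  (powers.foldr stepB (0, none)).1

-- ===== PRECONDITION & SPEC =====
def Spec_cards (n : Int) (k : Int) (powers : List Int) (out : Int) : Prop := out = cards_alt n k powers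
instance (n : Int) (k : Int) (powers : List Int) (out : Int) : Decidable (Spec_cards n k powers out) := by unfold Spec_cards; infer_instance

-- ===== CLAIM (what is proved, stated in full; the proofs are below) =====
def Claim_equal_cards : Prop := ∀ (n : Int) (k : Int) (powers : List Int), Dom_cards n k powers → Spec_cards n k powers (cards n k powers)

-- ===== LEMMAS AND PROOFS =====

-- number of elements of d that are ≥ the running maximum (none = no bound yet)
def countGE (d : List Int) : Option Int → Nat
  | none => d.length
  | some m => (d.filter (fun x => m ≤ x)).length

theorem popLoop_eq_filter (d : List Int) (p : Int) (h : d.Pairwise (· ≥ ·)) :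
    popLoop d p = d.filter (fun x => p ≤ x) := by
  fun_induction popLoop d p with
  | case1 d t hlast hlt ih =>
    have hne : d ≠ [] := by rintro rfl; simp at hlast
    have hd : d.dropLast ++ [d.getLast hne] = d := List.dropLast_append_getLast hne
    have ht : d.getLast hne = t := by
      have := List.getLast?_eq_some_getLast hne
      rw [hlast] at this; exact (Option.some.inj this).symm
    have hp : d.dropLast.Pairwise (· ≥ ·) := h.sublist (List.dropLast_sublist d)
    rw [ih hp]
    conv_rhs => rw [← hd]
    rw [List.filter_append]
    simp [ht, not_le.mpr hlt]
  | case2 d t hlast hge =>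
    have hne : d ≠ [] := by rintro rfl; simp at hlast
    have hd : d.dropLast ++ [d.getLast hne] = d := List.dropLast_append_getLast hne
    have ht : d.getLast hne = t := by
      have := List.getLast?_eq_some_getLast hne
      rw [hlast] at this; exact (Option.some.inj this).symm
    symm
    rw [List.filter_eq_self]
    intro x hx
    rw [← hd] at hx h
    rcases List.mem_append.mp hx with hx | hx
    · have := (List.pairwise_append.mp h).2.2 x hx (d.getLast hne) (by simp)
      simp only [ge_iff_le] at this
      simp only [decide_eq_true_eq]
      omega
    · simp at hx
      subst hx
      simp only [decide_eq_true_eq]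
      omega
  | case3 d hlast =>
    cases d with
    | nil => rfl
    | cons a l => simp at hlast

theorem step_pairwise (d : List Int) (p : Int) (h : d.Pairwise (· ≥ ·)) :
    (d.filter (fun x => p ≤ x) ++ [p]).Pairwise (· ≥ ·) := by
  rw [List.pairwise_append]
  refine ⟨h.filter _, by simp, ?_⟩
  intro x hx y hy
  simp at hy
  subst hy
  have := List.of_mem_filter hx
  simp only [decide_eq_true_eq] at this
  omega

theorem foldB_cons_snd (p : Int) (ps : List Int) :
    ∃ m, ((p :: ps).foldr stepB (0, none)).2 = some m := by
  simp only [List.foldr_cons]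
  rcases h : ps.foldr stepB (0, none) with ⟨c, o⟩
  cases o <;> simp [stepB]

theorem foldB_fst_nonneg (ps : List Int) : 0 ≤ (ps.foldr stepB (0, none)).1 := by
  induction ps with
  | nil => simp
  | cons p rest ih =>
    simp only [List.foldr_cons]
    rcases h : rest.foldr stepB (0, none) with ⟨c, o⟩
    rw [h] at ih
    cases o with
    | none => simp [stepB]; omega
    | some m => simp only [stepB]; split <;> omega

theorem main_lemma (ps : List Int) : ∀ d : List Int, d.Pairwise (· ≥ ·) →
    (ps.foldl (fun deck power => popLoop deck power ++ [power]) d).length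
      = countGE d (ps.foldr stepB (0, none)).2 + (ps.foldr stepB (0, none)).1.toNat := by
  induction ps with
  | nil => intro d _; simp [countGE]
  | cons p rest ih =>
    intro d hd
    have hstep : popLoop d p ++ [p] = d.filter (fun x => p ≤ x) ++ [p] := by
      rw [popLoop_eq_filter d p hd]
    rw [List.foldl_cons, hstep]
    rw [ih _ (step_pairwise d p hd)]
    cases rest with
    | nil =>
      simp [countGE, stepB]
    | cons r rs =>
      obtain ⟨m, hm⟩ := foldB_cons_snd r rs
      rcases hc : ((r :: rs).foldr stepB (0, none)) with ⟨c, o⟩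
      rw [hc] at hm; simp at hm; subst hm
      have hnn : 0 ≤ c := by
        have := foldB_fst_nonneg (r :: rs)
        rw [hc] at this; exact this
      simp only [List.foldr_cons, hc, stepB, countGE, List.filter_append]
      by_cases hmp : m ≤ p
      · simp only [if_pos hmp]
        have hfe : (d.filter (fun x => p ≤ x)).filter (fun x => m ≤ x)
            = d.filter (fun x => max m p ≤ x) := by
          rw [List.filter_filter]
          apply List.filter_congr
          intro x _
          by_cases h1 : p ≤ x <;> by_cases h2 : m ≤ x <;>
            simp [h1, h2]
        rw [hfe]
        simp [hmp]
        omega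
      · simp only [if_neg hmp]
        have hfe : (d.filter (fun x => p ≤ x)).filter (fun x => m ≤ x)
            = d.filter (fun x => max m p ≤ x) := by
          rw [List.filter_filter]
          apply List.filter_congr
          intro x _
          by_cases h1 : p ≤ x <;> by_cases h2 : m ≤ x <;>
            simp [h1, h2]
        rw [hfe]
        simp [not_le.mp hmp, not_le]

-- ===== VERDICT (by name: the statement is the Claim_ definition above) =====
theorem cards_spec : Claim_equal_cards := by
  intro n k powers _
  unfold Spec_cards
  show ((powers.foldl (fun deck power => popLoop deck power ++ [power]) ([] : List Int)).length : Int)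
      = (powers.foldr stepB (0, none)).1
  have h := main_lemma powers [] (by simp)
  simp only [countGE, List.filter_nil, List.length_nil] at h
  have hnn := foldB_fst_nonneg powers
  rcases ho : (powers.foldr stepB (0, none)).2 with _ | m <;> rw [ho] at h <;>
    simp only [] at h <;> omega
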